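-- pv_equiv track=rewrite | github.com/HormyAJP/advent_of_code_2024 | 21.py | line_up_As
-- ===== SOURCE A (Python) =====
-- def line_up_As(bigger, smaller):
--     extended_smaller = ""
--     j = 0
--     for i in range(0, len(bigger)):
--         if bigger[i] == "A":
--             extended_smaller += smaller[j]
--             j += 1
--         else:
--             extended_smaller += " "
--     return extended_smaller
-- ===== SOURCE B (Python) =====
-- def line_up_As(bigger, smaller):
--     idxs = [i for i, c in enumerate(bigger) if c == "A"]
--     res = [" "] * len(bigger)
--     for k, i in enumerate(idxs):
--         res[i] = smaller[k]
--     return "".join(res)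
-- ===== Notes on version B (the rewrite author's own statement) =====
-- stated objective: alternative
-- what changed: Replaces the single interleaved pass with a running cursor into smaller by an index-building pass (positions of 'A') followed by a scatter into a preallocated space-filled list, joined at the end.
import Mathlib
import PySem

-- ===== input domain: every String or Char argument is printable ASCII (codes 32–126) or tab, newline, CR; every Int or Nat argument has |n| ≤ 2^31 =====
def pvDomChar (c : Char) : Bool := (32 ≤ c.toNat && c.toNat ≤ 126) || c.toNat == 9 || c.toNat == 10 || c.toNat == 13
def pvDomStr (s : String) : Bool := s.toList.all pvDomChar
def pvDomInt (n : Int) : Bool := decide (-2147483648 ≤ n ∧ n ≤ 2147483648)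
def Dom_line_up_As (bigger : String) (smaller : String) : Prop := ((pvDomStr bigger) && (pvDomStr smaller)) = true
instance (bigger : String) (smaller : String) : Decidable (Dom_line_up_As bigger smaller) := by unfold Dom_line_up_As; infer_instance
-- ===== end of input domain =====

-- B replaces A's single interleaved pass (cursor j into smaller) by an index-building pass
-- (positions of 'A') followed by a scatter into a preallocated space-filled list: alternative decomposition.

-- ===== PORT A =====
-- A: walk bigger left to right, appending smaller[j] at each 'A' (advancing j) and ' ' otherwise.
-- smaller[j] is in range on every input admitted by Pre_ (j < len(smaller)); getD's default is never used there.
def line_up_As (bigger : String) (smaller : String) : String :=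
  let ss := smaller.toList
  let r := bigger.toList.foldl
    (fun (st : List Char × Nat) c =>
      if c = 'A' then (st.1 ++ [ss.getD st.2 ' '], st.2 + 1)
      else (st.1 ++ [' '], st.2)) ([], 0)
  String.ofList r.1

-- ===== PORT B =====
-- enumerate(xs) starting at n
def pvEnumFrom {α : Type} : Nat → List α → List (Nat × α)
  | _, [] => []
  | n, x :: t => (n, x) :: pvEnumFrom (n + 1) t

-- B: idxs = positions of 'A'; res = [' ']*len(bigger); res[i] = smaller[k] for (k,i) in enumerate(idxs); join.
-- smaller[k] is in range on every input admitted by Pre_; getD's default is never used there.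
def line_up_As_alt (bigger : String) (smaller : String) : String :=
  let cs := bigger.toList
  let ss := smaller.toList
  let idxs := ((pvEnumFrom 0 cs).filter (fun p => p.2 = 'A')).map (fun p => p.1)
  let res := List.replicate cs.length ' '
  let res := (pvEnumFrom 0 idxs).foldl (fun r p => r.set p.2 (ss.getD p.1 ' ')) res
  String.ofList res

-- ===== PRECONDITION & SPEC =====
-- Pre_ excludes exactly the inputs where Python A raises IndexError: bigger contains more 'A's
-- than smaller has characters (B raises the same IndexError there).
def Pre_line_up_As (bigger : String) (smaller : String) : Prop :=
  bigger.toList.count 'A' ≤ smaller.toList.length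
instance (bigger : String) (smaller : String) : Decidable (Pre_line_up_As bigger smaller) := by
  unfold Pre_line_up_As; infer_instance

def pvWitness_line_up_As : String × String := ("<A^Av<<AA", "abcd")

def Spec_line_up_As (bigger : String) (smaller : String) (out : String) : Prop := out = line_up_As_alt bigger smaller
instance (bigger : String) (smaller : String) (out : String) : Decidable (Spec_line_up_As bigger smaller out) := by unfold Spec_line_up_As; infer_instance

-- ===== CLAIM (what is proved, stated in full; the proofs are below) =====
def Claim_equal_line_up_As : Prop := ∀ (bigger : String) (smaller : String), Dom_line_up_As bigger smaller → Pre_line_up_As bigger smaller → Spec_line_up_As bigger smaller (line_up_As bigger smaller)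

-- ===== LEMMAS AND PROOFS =====

-- the intended common value of both ports, recursively
def pvBuild (ss : List Char) : List Char → Nat → List Char
  | [], _ => []
  | c :: t, j => if c = 'A' then ss.getD j ' ' :: pvBuild ss t (j + 1) else ' ' :: pvBuild ss t j

def pvFinJ : List Char → Nat → Nat
  | [], j => j
  | c :: t, j => if c = 'A' then pvFinJ t (j + 1) else pvFinJ t j

theorem pvA_foldl (ss : List Char) :
    ∀ (cs : List Char) (acc : List Char) (j : Nat),
      cs.foldl (fun (st : List Char × Nat) c =>
        if c = 'A' then (st.1 ++ [ss.getD st.2 ' '], st.2 + 1)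
        else (st.1 ++ [' '], st.2)) (acc, j)
      = (acc ++ pvBuild ss cs j, pvFinJ cs j) := by
  intro cs
  induction cs with
  | nil => intro acc j; simp [pvBuild, pvFinJ]
  | cons c t ih =>
    intro acc j
    by_cases h : c = 'A' <;> simp only [pvBuild, pvFinJ, h, if_pos, ite_false, List.foldl_cons] <;> rw [ih] <;> simp

-- positions of 'A' in cs, recursively
def pvIdxs : List Char → List Nat
  | [] => []
  | c :: t => if c = 'A' then 0 :: (pvIdxs t).map (· + 1) else (pvIdxs t).map (· + 1)

theorem pvIdxs_eq : ∀ (cs : List Char) (n : Nat),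
    ((pvEnumFrom n cs).filter (fun p => p.2 = 'A')).map (fun p => p.1)
      = (pvIdxs cs).map (· + n) := by
  intro cs
  induction cs with
  | nil => intro n; simp [pvEnumFrom, pvIdxs]
  | cons c t ih =>
    intro n
    by_cases h : c = 'A' <;>
      simp [pvEnumFrom, pvIdxs, h, ih, List.map_map] <;> intro a _ <;> omega

theorem pvEnum_shift : ∀ (l : List Nat) (n : Nat),
    pvEnumFrom n (l.map (· + 1)) = (pvEnumFrom n l).map (fun p => (p.1, p.2 + 1)) := by
  intro l
  induction l with
  | nil => intro n; simp [pvEnumFrom]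
  | cons x t ih => intro n; simp [pvEnumFrom, ih]

theorem pvScatter_shift (ss : List Char) :
    ∀ (pairs : List (Nat × Nat)) (x : Char) (r : List Char),
      (pairs.map (fun p => (p.1, p.2 + 1))).foldl
          (fun r (p : Nat × Nat) => r.set p.2 (ss.getD p.1 ' ')) (x :: r)
        = x :: pairs.foldl (fun r (p : Nat × Nat) => r.set p.2 (ss.getD p.1 ' ')) r := by
  intro pairs
  induction pairs with
  | nil => intro x r; simp
  | cons p t ih =>
    intro x r
    simp only [List.map_cons, List.foldl_cons, List.set_cons_succ]
    exact ih x _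

theorem pvScatter_eq (ss : List Char) :
    ∀ (cs : List Char) (j : Nat),
      (pvEnumFrom j (pvIdxs cs)).foldl
          (fun r (p : Nat × Nat) => r.set p.2 (ss.getD p.1 ' '))
          (List.replicate cs.length ' ')
        = pvBuild ss cs j := by
  intro cs
  induction cs with
  | nil => intro j; simp [pvIdxs, pvEnumFrom, pvBuild]
  | cons c t ih =>
    intro j
    by_cases h : c = 'A'
    · simp only [pvIdxs, pvBuild, h, if_pos, List.length_cons, List.replicate_succ,
        pvEnumFrom, List.foldl_cons, List.set_cons_zero,
        pvEnum_shift, pvScatter_shift, ih]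
    · simp only [pvIdxs, pvBuild, h, List.length_cons, List.replicate_succ,
        pvEnum_shift, pvScatter_shift, ih, ite_false]

-- ===== VERDICT (by name: the statement is the Claim_ definition above) =====
theorem line_up_As_spec : Claim_equal_line_up_As := by
  intro bigger smaller _ _
  unfold Spec_line_up_As line_up_As line_up_As_alt
  simp only [pvA_foldl, pvIdxs_eq]
  have h0 : (pvIdxs bigger.toList).map (· + 0) = pvIdxs bigger.toList := by simp
  rw [h0, pvScatter_eq]
  simp
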